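-- pv_equiv track=rewrite | github.com/tw-repository/AsyReC | dataset.py | sync_dictionaries
-- ===== SOURCE A (Python) =====
-- def sync_dictionaries(dict1, dict2):
--
--     def get_key_parts(key):
--         parts = key.split('_')
--         return (parts[0], parts[-1])
--
--     keys1 = set(get_key_parts(key) for key in dict1.keys())
--     keys2 = set(get_key_parts(key) for key in dict2.keys())
--
--     common_keys = keys1 & keys2
--
--     synchronized_dict1 = {key: dict1[key] for key in dict1 if get_key_parts(key) in common_keys}
--     synchronized_dict2 = {key: dict2[key] for key in dict2 if get_key_parts(key) in common_keys}
--
--     return synchronized_dict1, synchronized_dict2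
-- ===== SOURCE B (Python) =====
-- def sync_dictionaries(dict1, dict2):
--     def sig(key):
--         parts = key.split('_')
--         return (parts[0], parts[-1])
--
--     def shared(key, other):
--         s = sig(key)
--         return any(sig(k) == s for k in other)
--
--     return ({k: v for k, v in dict1.items() if shared(k, dict2)},
--             {k: v for k, v in dict2.items() if shared(k, dict1)})
-- ===== Notes on version B (the rewrite author's own statement) =====
-- stated objective: simpler
-- what changed: B drops the two signature sets and their intersection entirely: each key is kept iff SOME key of the other dict shares its signature, decided by a direct nested scan over the other dict (brute-force pairwise comparison instead of set construction + intersection + membership filtering).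
import Mathlib
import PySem

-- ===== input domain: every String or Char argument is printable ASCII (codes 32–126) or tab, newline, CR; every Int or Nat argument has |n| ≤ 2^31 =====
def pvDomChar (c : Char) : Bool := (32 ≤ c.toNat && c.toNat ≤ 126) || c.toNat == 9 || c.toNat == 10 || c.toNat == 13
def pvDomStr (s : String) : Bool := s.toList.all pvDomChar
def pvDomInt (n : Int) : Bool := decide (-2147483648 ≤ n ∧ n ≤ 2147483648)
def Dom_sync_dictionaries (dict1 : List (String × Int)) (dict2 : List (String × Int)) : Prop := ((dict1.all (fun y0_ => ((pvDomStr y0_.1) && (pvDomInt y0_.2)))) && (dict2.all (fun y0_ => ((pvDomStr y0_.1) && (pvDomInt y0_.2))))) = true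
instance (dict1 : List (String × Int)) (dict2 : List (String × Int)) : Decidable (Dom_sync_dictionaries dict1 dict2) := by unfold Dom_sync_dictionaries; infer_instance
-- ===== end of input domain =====

-- B removes the signature sets and their intersection: a key is kept iff some
-- key of the OTHER dict shares its signature, decided by a direct nested scan
-- (shorter and plainer than A; quadratic instead of linear, no speed claim).

-- ===== PORT A =====
-- shared helper: get_key_parts(key) = (key.split('_')[0], key.split('_')[-1]);
-- split of any string is nonempty, so the .getD "" defaults are never reached
def keyParts (key : String) : String × String :=
  let parts := (PySem.Str.split? key "_").getD []
  ((PySem.List.pyGet? parts 0).getD "", (PySem.List.pyGet? parts (-1)).getD "")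

def sync_dictionaries (dict1 : List (String × Int)) (dict2 : List (String × Int)) : (List (String × Int)) × (List (String × Int)) :=
  let d1 : PySem.Dict String Int := PySem.Dict.mk dict1
  let d2 : PySem.Dict String Int := PySem.Dict.mk dict2
  let keys1 : PySem.Set (String × String) := PySem.Set.ofList (d1.keys.map keyParts)
  let keys2 : PySem.Set (String × String) := PySem.Set.ofList (d2.keys.map keyParts)
  let common := PySem.Set.inter keys1 keys2
  -- {key: dict1[key] for key in dict1 if get_key_parts(key) in common_keys}
  let sd1 := d1.keys.foldl (fun d k => if common.contains (keyParts k) then d.insert k (d1.getD k 0) else d) PySem.Dict.empty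
  let sd2 := d2.keys.foldl (fun d k => if common.contains (keyParts k) then d.insert k (d2.getD k 0) else d) PySem.Dict.empty
  (sd1.items, sd2.items)

-- ===== PORT B =====
-- shared(key, other) = any(sig(k) == sig(key) for k in other)
def sharedSig (key : String) (other : List (String × Int)) : Bool :=
  let s := keyParts key
  other.any (fun kv => keyParts kv.1 == s)

def sync_dictionaries_alt (dict1 : List (String × Int)) (dict2 : List (String × Int)) : (List (String × Int)) × (List (String × Int)) :=
  let s1 := dict1.foldl (fun d kv => if sharedSig kv.1 dict2 then d.insert kv.1 kv.2 else d) (PySem.Dict.empty : PySem.Dict String Int)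
  let s2 := dict2.foldl (fun d kv => if sharedSig kv.1 dict1 then d.insert kv.1 kv.2 else d) (PySem.Dict.empty : PySem.Dict String Int)
  (s1.items, s2.items)

-- ===== PRECONDITION & SPEC =====
-- Pre_: the arguments are Python dicts, so their keys are unique; association
-- lists with duplicated keys represent no dict input A could receive.
def Pre_sync_dictionaries (dict1 : List (String × Int)) (dict2 : List (String × Int)) : Prop :=
  (dict1.map Prod.fst).Nodup ∧ (dict2.map Prod.fst).Nodup
instance (dict1 : List (String × Int)) (dict2 : List (String × Int)) : Decidable (Pre_sync_dictionaries dict1 dict2) := by unfold Pre_sync_dictionaries; infer_instance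

def pvWitness_sync_dictionaries : (List (String × Int)) × (List (String × Int)) :=
  ([("a_1", 1), ("b_2", 2)], [("a_x_1", 5)])

def Spec_sync_dictionaries (dict1 : List (String × Int)) (dict2 : List (String × Int)) (out : (List (String × Int)) × (List (String × Int))) : Prop := out = sync_dictionaries_alt dict1 dict2
instance (dict1 : List (String × Int)) (dict2 : List (String × Int)) (out : (List (String × Int)) × (List (String × Int))) : Decidable (Spec_sync_dictionaries dict1 dict2 out) := by unfold Spec_sync_dictionaries; infer_instance

-- ===== CLAIM (what is proved, stated in full; the proofs are below) =====
def Claim_equal_sync_dictionaries : Prop := ∀ (dict1 : List (String × Int)) (dict2 : List (String × Int)), Dom_sync_dictionaries dict1 dict2 → Pre_sync_dictionaries dict1 dict2 → Spec_sync_dictionaries dict1 dict2 (sync_dictionaries dict1 dict2)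

-- ===== LEMMAS AND PROOFS =====

theorem getD_mk_of_mem {l : List (String × Int)} {k : String} {v : Int}
    (hmem : (k, v) ∈ l) (hnd : (l.map Prod.fst).Nodup) :
    (PySem.Dict.mk l).getD k 0 = v :=
  PySem.Dict.getD_of_mem_items (PySem.Dict.mk l) hmem hnd 0

-- B's nested scan decides signature membership in the other dict
theorem sharedSig_eq_mem (k : String) (other : List (String × Int)) :
    sharedSig k other = decide (keyParts k ∈ other.map (fun kv => keyParts kv.1)) := by
  rw [Bool.eq_iff_iff]
  simp only [sharedSig, List.any_eq_true, beq_iff_eq, decide_eq_true_eq, List.mem_map]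

-- A's membership test in the intersection set, for a key of the own dict
theorem common_contains_of_own (dict1 dict2 : List (String × Int)) {k : String}
    (hk : k ∈ dict1.map Prod.fst) :
    (PySem.Set.inter (PySem.Set.ofList ((dict1.map Prod.fst).map keyParts))
      (PySem.Set.ofList ((dict2.map Prod.fst).map keyParts))).contains (keyParts k)
    = sharedSig k dict2 := by
  have m1 : keyParts k ∈ (dict1.map Prod.fst).map keyParts := List.mem_map.mpr ⟨k, hk, rfl⟩
  rw [sharedSig_eq_mem, Bool.eq_iff_iff]
  simp only [PySem.Set.contains_iff, decide_eq_true_eq, PySem.Set.mem_inter,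
    PySem.Set.mem_ofList, List.map_map, Function.comp, List.mem_map] at m1 ⊢
  tauto

-- mirror: same intersection, key from the second dict
theorem common_contains_of_own' (dict1 dict2 : List (String × Int)) {k : String}
    (hk : k ∈ dict2.map Prod.fst) :
    (PySem.Set.inter (PySem.Set.ofList ((dict1.map Prod.fst).map keyParts))
      (PySem.Set.ofList ((dict2.map Prod.fst).map keyParts))).contains (keyParts k)
    = sharedSig k dict1 := by
  have m2 : keyParts k ∈ (dict2.map Prod.fst).map keyParts := List.mem_map.mpr ⟨k, hk, rfl⟩
  rw [sharedSig_eq_mem, Bool.eq_iff_iff]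
  simp only [PySem.Set.contains_iff, decide_eq_true_eq, PySem.Set.mem_inter,
    PySem.Set.mem_ofList, List.map_map, Function.comp, List.mem_map] at m2 ⊢
  tauto

-- ===== VERDICT (by name: the statement is the Claim_ definition above) =====
theorem sync_dictionaries_spec : Claim_equal_sync_dictionaries := by
  intro dict1 dict2 _hDom hPre
  obtain ⟨h1, h2⟩ := hPre
  have hk1 : (PySem.Dict.mk dict1).keys = dict1.map Prod.fst := by simp [PySem.Dict.keys]
  have hk2 : (PySem.Dict.mk dict2).keys = dict2.map Prod.fst := by simp [PySem.Dict.keys]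
  simp only [Spec_sync_dictionaries, sync_dictionaries, sync_dictionaries_alt, hk1, hk2,
    List.foldl_map, Prod.mk.injEq]
  refine ⟨?_, ?_⟩
  · congr 1
    apply PySem.List.foldl_congr_mem
    intro acc kv hkv
    have hmem : kv.1 ∈ dict1.map Prod.fst := List.mem_map.mpr ⟨kv, hkv, rfl⟩
    rw [common_contains_of_own dict1 dict2 hmem]
    by_cases hc : sharedSig kv.1 dict2 = true
    · simp [hc, getD_mk_of_mem (show (kv.1, kv.2) ∈ dict1 by simpa using hkv) h1]
    · simp [hc]
  · congr 1
    apply PySem.List.foldl_congr_mem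
    intro acc kv hkv
    have hmem : kv.1 ∈ dict2.map Prod.fst := List.mem_map.mpr ⟨kv, hkv, rfl⟩
    rw [common_contains_of_own' dict1 dict2 hmem]
    by_cases hc : sharedSig kv.1 dict1 = true
    · simp [hc, getD_mk_of_mem (show (kv.1, kv.2) ∈ dict2 by simpa using hkv) h2]
    · simp [hc]
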